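-- pv_equiv track=rewrite | github.com/jjojas/TugasKripto2122 | modules/fairplay cipher.py | convertPlainTextToBigrams
-- ===== SOURCE A (Python) =====
-- def convertPlainTextToBigrams(plainText: str):
--     '''
--     convert a PlainText to acceptable Bigrams
--     '''
--     #1.ganti huruf 'j' ke 'i'
--     #2.bagi jadi bigram
--     #3.add 'x' kalo ada pasangan yang sama
--     #4.add 'x' kalo ganjil
--     plainText = plainText.replace('j', 'i')
--
--     i = 0
--     while i < len(plainText):
--         if i != len(plainText)-1:
--             if plainText[i] == plainText[i+1]:
--                 plainText = plainText[:i+1] + 'x' + plainText[i+1:]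
--         i+=2
--
--     if len(plainText) % 2 != 0:
--         plainText += 'x'
--
--     return plainText
-- ===== SOURCE B (Python) =====
-- def convertPlainTextToBigrams(plainText: str):
--     '''
--     convert a PlainText to acceptable Bigrams
--     '''
--     plainText = plainText.replace('j', 'i')
--     out = []
--     first = None
--     for c in plainText:
--         if first is None:
--             first = c
--         elif c == first:
--             out.append(first)
--             out.append('x')
--             first = c  # the duplicate letter carries into the next pair
--         else:
--             out.append(first)
--             out.append(c)
--             first = None
--     if first is not None:
--         out.append(first)
--         out.append('x')
--     return ''.join(out)
-- ===== Notes on version B (the rewrite author's own statement) =====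
-- stated objective: faster
-- what changed: Replaces the while loop that re-indexes pairs and rebuilds the whole string by slice-insertion on every duplicate pair (plus a final parity check) with a single per-character state machine carrying the pending unmatched letter and appending to an output list.
import Mathlib
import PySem

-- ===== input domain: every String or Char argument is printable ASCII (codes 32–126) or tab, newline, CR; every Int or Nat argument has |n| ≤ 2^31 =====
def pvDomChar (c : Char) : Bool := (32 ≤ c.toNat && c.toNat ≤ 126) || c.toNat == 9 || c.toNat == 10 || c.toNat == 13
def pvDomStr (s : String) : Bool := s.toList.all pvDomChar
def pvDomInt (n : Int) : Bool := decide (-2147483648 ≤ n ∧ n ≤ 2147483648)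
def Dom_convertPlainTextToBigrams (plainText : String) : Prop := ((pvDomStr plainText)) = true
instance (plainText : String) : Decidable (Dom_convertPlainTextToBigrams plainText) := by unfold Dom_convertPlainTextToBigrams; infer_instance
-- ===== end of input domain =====

-- B replaces A's pair-indexing loop with slice-insertion by a one-pass state machine carrying the pending letter (simpler).


-- ===== PORT A =====
-- A's while loop: i steps by 2; on a repeated pair, 'x' is inserted after position i
-- (Python's slices s[:i+1] / s[i+1:] with 0 ≤ i+1 ≤ len are exactly take/drop).
def goA (s : List Char) (i : Nat) : List Char :=
  if _h : i < s.length then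
    if i ≠ s.length - 1 ∧ s[i]? = s[i + 1]? then
      goA (s.take (i + 1) ++ 'x' :: s.drop (i + 1)) (i + 2)
    else
      goA s (i + 2)
  else s
termination_by s.length - i
decreasing_by
  · simp only [List.length_append, List.length_take, List.length_cons, List.length_drop]; omega
  · omega

-- the final parity padding of A
def padA (r : List Char) : List Char := if r.length % 2 ≠ 0 then r ++ ['x'] else r

def convertPlainTextToBigrams (plainText : String) : String :=
  String.ofList (padA (goA (PySem.Str.replace plainText "j" "i").toList 0))

-- ===== PORT B =====
-- B's state machine: the pending unmatched letter is the Option Char state.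
def goB : List Char → Option Char → List Char
  | [], none => []
  | [], some f => [f, 'x']
  | c :: rest, none => goB rest (some c)
  | c :: rest, some f =>
    if c = f then f :: 'x' :: goB rest (some c)
    else f :: c :: goB rest none

def convertPlainTextToBigrams_alt (plainText : String) : String :=
  String.ofList (goB (PySem.Str.replace plainText "j" "i").toList none)

-- ===== PRECONDITION & SPEC =====
def Spec_convertPlainTextToBigrams (plainText : String) (out : String) : Prop := out = convertPlainTextToBigrams_alt plainText
instance (plainText : String) (out : String) : Decidable (Spec_convertPlainTextToBigrams plainText out) := by unfold Spec_convertPlainTextToBigrams; infer_instance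

-- ===== CLAIM (what is proved, stated in full; the proofs are below) =====
def Claim_equal_convertPlainTextToBigrams : Prop := ∀ (plainText : String), Dom_convertPlainTextToBigrams plainText → Spec_convertPlainTextToBigrams plainText (convertPlainTextToBigrams plainText)

-- ===== LEMMAS AND PROOFS =====
-- goA never touches the first p.length characters once i has passed them.
theorem goA_shift (p : List Char) (s : List Char) (i : Nat) :
    goA (p ++ s) (p.length + i) = p ++ goA s i := by
  fun_induction goA s i with
  | case1 s i h hc ih =>
    conv_lhs => rw [goA]
    rw [dif_pos (by simp only [List.length_append]; omega)]
    have hget : ∀ j : Nat, (p ++ s)[p.length + j]? = s[j]? := by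
      intro j
      rw [List.getElem?_append_right (by omega)]
      congr 1; omega
    have hc' : p.length + i ≠ (p ++ s).length - 1 ∧
        (p ++ s)[p.length + i]? = (p ++ s)[p.length + i + 1]? := by
      refine ⟨by simp only [List.length_append]; omega, ?_⟩
      rw [show p.length + i + 1 = p.length + (i + 1) by omega, hget, hget]
      exact hc.2
    rw [if_pos hc']
    have ht : (p ++ s).take (p.length + i + 1) = p ++ s.take (i + 1) := by
      rw [show p.length + i + 1 = p.length + (i + 1) by omega]; simp [List.take_append]
    have hd : (p ++ s).drop (p.length + i + 1) = s.drop (i + 1) := by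
      rw [show p.length + i + 1 = p.length + (i + 1) by omega]; simp [List.drop_append]
    rw [ht, hd, List.append_assoc]
    rw [show p.length + i + 2 = p.length + (i + 2) by omega]
    exact ih
  | case2 s i h hc ih =>
    conv_lhs => rw [goA]
    rw [dif_pos (by simp only [List.length_append]; omega)]
    have hget : ∀ j : Nat, (p ++ s)[p.length + j]? = s[j]? := by
      intro j
      rw [List.getElem?_append_right (by omega)]
      congr 1; omega
    rw [if_neg (by
      rintro ⟨h1, h2⟩
      rw [show p.length + i + 1 = p.length + (i + 1) by omega, hget, hget] at h2
      exact hc ⟨by simp only [List.length_append] at h1; omega, h2⟩)]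
    rw [show p.length + i + 2 = p.length + (i + 2) by omega]
    exact ih
  | case3 s i h =>
    conv_lhs => rw [goA]
    rw [dif_neg (by simp only [List.length_append]; omega)]

theorem padA_cons_cons (x y : Char) (r : List Char) :
    padA (x :: y :: r) = x :: y :: padA r := by
  simp only [padA, List.length_cons]
  by_cases hp : r.length % 2 = 0
  · rw [if_neg (by omega), if_neg (by omega)]
  · rw [if_pos (by omega), if_pos (by omega)]; simp

-- main invariant: A's result after the parity padding is exactly B's state machine run.
theorem mainLemma (s : List Char) : padA (goA s 0) = goB s none := by
  match s with
  | [] => simp [goA, goB, padA]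
  | [c] =>
    rw [goA, dif_pos (by simp), if_neg (by simp)]
    rw [goA, dif_neg (by simp)]
    simp [goB, padA]
  | a :: b :: rest =>
    conv_lhs => rw [goA]
    rw [dif_pos (by simp only [List.length_cons]; omega)]
    by_cases hab : a = b
    · subst hab
      rw [if_pos (by simp only [List.length_cons]; exact ⟨by omega, by simp⟩)]
      simp only [List.take_succ_cons, List.take_zero, List.drop_succ_cons, List.drop_zero]
      have hsh := goA_shift [a, 'x'] (a :: rest) 0
      simp only [List.length_cons, List.length_nil] at hsh
      rw [show ([a] ++ 'x' :: a :: rest : List Char) = [a, 'x'] ++ (a :: rest) by simp,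
        show (0 + 2 : Nat) = 0 + 1 + 1 + 0 by omega, hsh]
      rw [show ([a, 'x'] ++ goA (a :: rest) 0 : List Char)
          = a :: 'x' :: goA (a :: rest) 0 by simp]
      rw [padA_cons_cons, mainLemma (a :: rest)]
      simp [goB]
    · rw [if_neg (by simp [hab])]
      have hsh := goA_shift [a, b] rest 0
      simp only [List.length_cons, List.length_nil] at hsh
      rw [show (a :: b :: rest : List Char) = [a, b] ++ rest by simp,
        show (0 + 2 : Nat) = 0 + 1 + 1 + 0 by omega, hsh]
      rw [show ([a, b] ++ goA rest 0 : List Char) = a :: b :: goA rest 0 by simp]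
      rw [padA_cons_cons, mainLemma rest]
      have hba : ¬ b = a := fun h => hab h.symm
      simp [goB, hba]
termination_by s.length

-- ===== VERDICT (by name: the statement is the Claim_ definition above) =====
theorem convertPlainTextToBigrams_spec : Claim_equal_convertPlainTextToBigrams := by
  intro plainText _
  unfold Spec_convertPlainTextToBigrams convertPlainTextToBigrams convertPlainTextToBigrams_alt
  rw [mainLemma]
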